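-- pv_equiv track=rewrite | github.com/CarlPowaza/8-queens | 8-queens.py | horizontalAttacks
-- ===== SOURCE A (Python) =====
-- def horizontalAttacks(board):
--     count=0
--     for row in range(0,8):
--         for q in range(0,8):
--             if(row != q):
--                 if(board[row]==board[q]):
--
--                     count =count +1
--     return count
-- ===== SOURCE B (Python) =====
-- def horizontalAttacks(board):
--     # Tally the eight column values once, then sum k*(k-1) over the distinct
--     # values: a value occurring k times yields k*(k-1) ordered attacking pairs.
--     vals = [board[i] for i in range(8)]
--     distinct = list(dict.fromkeys(vals))
--     return sum(vals.count(v) * (vals.count(v) - 1) for v in distinct)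
-- ===== Notes on version B (the rewrite author's own statement) =====
-- stated objective: alternative
-- what changed: Replaces the nested 8x8 index double loop over ordered pairs by a single tally of the eight values followed by the closed-form reduction sum of k*(k-1) over the distinct values.
import Mathlib
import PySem

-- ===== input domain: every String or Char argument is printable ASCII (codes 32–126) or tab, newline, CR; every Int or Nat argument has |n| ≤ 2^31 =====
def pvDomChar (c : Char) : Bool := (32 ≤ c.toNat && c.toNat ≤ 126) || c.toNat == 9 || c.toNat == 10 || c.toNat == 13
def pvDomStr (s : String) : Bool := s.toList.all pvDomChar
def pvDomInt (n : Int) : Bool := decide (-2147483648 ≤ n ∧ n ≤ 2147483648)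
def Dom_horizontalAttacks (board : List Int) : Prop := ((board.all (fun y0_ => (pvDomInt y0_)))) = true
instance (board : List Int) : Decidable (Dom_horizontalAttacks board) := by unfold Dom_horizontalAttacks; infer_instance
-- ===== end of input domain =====

-- B replaces A's nested 8x8 ordered-pair double loop by one tally of the eight
-- values followed by the reduction sum of k*(k-1) over the distinct values
-- (objective: alternative algorithm of similar cost; sizes are fixed at 8).

-- ===== PORT A =====
def horizontalAttacks (board : List Int) : Int :=
  (PySem.List.pyRange 0 8 1).foldl (fun count row =>
    (PySem.List.pyRange 0 8 1).foldl (fun count q =>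
      if row ≠ q then
        (if PySem.List.pyGetD board row 0 = PySem.List.pyGetD board q 0 then count + 1 else count)
      else count) count) 0

-- ===== PORT B =====
def horizontalAttacks_alt (board : List Int) : Int :=
  let vals := (PySem.List.pyRange 0 8 1).map (fun i => PySem.List.pyGetD board i 0)
  ((PySem.List.dedup vals).map
    (fun v => (PySem.List.count vals v : Int) * ((PySem.List.count vals v : Int) - 1))).sum

-- ===== PRECONDITION & SPEC =====
-- Both Pythons index board[0..7], so they raise IndexError on boards shorter than 8;
-- exactly those inputs are excluded.
def Pre_horizontalAttacks (board : List Int) : Prop := 8 ≤ board.length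
instance (board : List Int) : Decidable (Pre_horizontalAttacks board) := by
  unfold Pre_horizontalAttacks; infer_instance
def pvWitness_horizontalAttacks : List Int := [0, 1, 2, 1, 4, 5, 1, 0]

def Spec_horizontalAttacks (board : List Int) (out : Int) : Prop := out = horizontalAttacks_alt board
instance (board : List Int) (out : Int) : Decidable (Spec_horizontalAttacks board out) := by unfold Spec_horizontalAttacks; infer_instance

-- ===== CLAIM (what is proved, stated in full; the proofs are below) =====
def Claim_equal_horizontalAttacks : Prop := ∀ (board : List Int), Dom_horizontalAttacks board → Pre_horizontalAttacks board → Spec_horizontalAttacks board (horizontalAttacks board)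

-- ===== LEMMAS AND PROOFS =====

-- Grouping identity: summing k*(k-1) over the distinct values of L equals
-- summing (count x - 1) over the elements x of L.
theorem tally_key (L : List Int) :
    ((PySem.List.dedup L).map (fun v => (L.count v : Int) * ((L.count v : Int) - 1))).sum
    = (L.map (fun x => (L.count x : Int) - 1)).sum := by
  rw [Finset.sum_list_map_count L (fun x => (L.count x : Int) - 1)]
  rw [← List.sum_toFinset _ (PySem.List.nodup_dedup L)]
  have h : (PySem.List.dedup L).toFinset = L.toFinset := by ext x; simp
  rw [h]
  exact Finset.sum_congr rfl (fun m _ => by rw [nsmul_eq_mul])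

-- A's nested accumulating loops written as a sum of 0/1 indicators.
theorem A_as_sum (board : List Int) :
    horizontalAttacks board = ((PySem.List.pyRange 0 8 1).map (fun row =>
      ((PySem.List.pyRange 0 8 1).map (fun q =>
        if row ≠ q ∧ PySem.List.pyGetD board row 0 = PySem.List.pyGetD board q 0
        then (1:Int) else 0)).sum)).sum := by
  unfold horizontalAttacks
  rw [List.foldl_ext _ (fun count row => count + ((PySem.List.pyRange 0 8 1).map (fun q =>
        if row ≠ q ∧ PySem.List.pyGetD board row 0 = PySem.List.pyGetD board q 0
        then (1:Int) else 0)).sum) 0 (fun c row _ => by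
      rw [List.foldl_ext _ (fun count q =>
          count + (if row ≠ q ∧ PySem.List.pyGetD board row 0 = PySem.List.pyGetD board q 0
          then (1:Int) else 0)) c (fun c' q _ => by split_ifs with h1 h2 <;> simp_all)]
      rw [PySem.List.foldl_add])]
  rw [PySem.List.foldl_add]
  simp

-- The two ports agree on any board with at least 8 entries.
set_option maxRecDepth 8192 in
theorem AB_cons (v0 v1 v2 v3 v4 v5 v6 v7 : Int) (rest : List Int) :
    horizontalAttacks (v0::v1::v2::v3::v4::v5::v6::v7::rest)
    = horizontalAttacks_alt (v0::v1::v2::v3::v4::v5::v6::v7::rest) := by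
  have hr : PySem.List.pyRange 0 8 1 = [0,1,2,3,4,5,6,7] := by decide
  have e0 : PySem.List.pyGetD (v0::v1::v2::v3::v4::v5::v6::v7::rest) 0 0 = v0 := by simp [pysem]
  have e1 : PySem.List.pyGetD (v0::v1::v2::v3::v4::v5::v6::v7::rest) 1 0 = v1 := by simp [pysem]
  have e2 : PySem.List.pyGetD (v0::v1::v2::v3::v4::v5::v6::v7::rest) 2 0 = v2 := by simp [pysem]
  have e3 : PySem.List.pyGetD (v0::v1::v2::v3::v4::v5::v6::v7::rest) 3 0 = v3 := by simp [pysem]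
  have e4 : PySem.List.pyGetD (v0::v1::v2::v3::v4::v5::v6::v7::rest) 4 0 = v4 := by simp [pysem]
  have e5 : PySem.List.pyGetD (v0::v1::v2::v3::v4::v5::v6::v7::rest) 5 0 = v5 := by simp [pysem]
  have e6 : PySem.List.pyGetD (v0::v1::v2::v3::v4::v5::v6::v7::rest) 6 0 = v6 := by simp [pysem]
  have e7 : PySem.List.pyGetD (v0::v1::v2::v3::v4::v5::v6::v7::rest) 7 0 = v7 := by simp [pysem]
  rw [A_as_sum]
  simp only [horizontalAttacks_alt, hr, List.map, e0, e1, e2, e3, e4, e5, e6, e7,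
    PySem.List.count_eq]
  rw [tally_key]
  simp only [List.map, List.sum_cons, List.sum_nil, List.count_cons, List.count_nil,
    beq_iff_eq, ne_eq]
  norm_num
  ring_nf

-- ===== VERDICT (by name: the statement is the Claim_ definition above) =====
set_option maxHeartbeats 1000000 in
theorem horizontalAttacks_spec : Claim_equal_horizontalAttacks := by
  intro board _ hpre
  unfold Spec_horizontalAttacks
  match board, hpre with
  | v0::v1::v2::v3::v4::v5::v6::v7::rest, _ => exact AB_cons v0 v1 v2 v3 v4 v5 v6 v7 rest
  | [], h | [_], h | [_,_], h | [_,_,_], h | [_,_,_,_], h | [_,_,_,_,_], h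
  | [_,_,_,_,_,_], h | [_,_,_,_,_,_,_], h =>
      exact absurd h (by simp [Pre_horizontalAttacks])
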